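-- pv_equiv track=rewrite | github.com/SilentBouquet/MyPython | PyTorch/工作项目/翻译教学系统/services/teaching.py | _fallback_get_initial_letters
-- ===== SOURCE A (Python) =====
-- def _fallback_get_initial_letters(english_text: str, word_count: int = 0) -> str:
--     """API调用失败时的备用方法"""
--     words = english_text.split()
--     result = []
--
--     for i, word in enumerate(words):
--         if word_count == 0 or i < word_count:
--             if word and word[0].isalpha():
--                 # 保留首字母，其他替换为下划线
--                 result.append(word[0] + '_' * (len(word) - 1))
--             else:
--                 # 对于标点符号等，保持原样
--                 result.append(word)
--         else:
--             # 超出提示单词数量限制，全部替换为下划线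
--             result.append('_' * len(word))
--
--     return ' '.join(result)
-- ===== SOURCE B (Python) =====
-- def _fallback_get_initial_letters(english_text: str, word_count: int = 0) -> str:
--     """Recursive re-implementation: consume the word list with a decrementing
--     hint budget (-1 = unlimited) instead of comparing an enumerate index
--     against word_count on every iteration."""
--     def go(ws, budget):
--         if not ws:
--             return []
--         w = ws[0]
--         if budget != 0:
--             piece = w[0] + '_' * (len(w) - 1) if w and w[0].isalpha() else w
--         else:
--             piece = '_' * len(w)
--         return [piece] + go(ws[1:], budget - 1 if budget > 0 else budget)
--     budget = -1 if word_count == 0 else max(word_count, 0)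
--     return ' '.join(go(english_text.split(), budget))
-- ===== Notes on version B (the rewrite author's own statement) =====
-- stated objective: alternative
-- what changed: Replaces the single enumerated loop with an index-vs-word_count test by a structural recursion over the word list carrying a decrementing hint budget (-1 meaning unlimited), so no index is ever compared.
import Mathlib
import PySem

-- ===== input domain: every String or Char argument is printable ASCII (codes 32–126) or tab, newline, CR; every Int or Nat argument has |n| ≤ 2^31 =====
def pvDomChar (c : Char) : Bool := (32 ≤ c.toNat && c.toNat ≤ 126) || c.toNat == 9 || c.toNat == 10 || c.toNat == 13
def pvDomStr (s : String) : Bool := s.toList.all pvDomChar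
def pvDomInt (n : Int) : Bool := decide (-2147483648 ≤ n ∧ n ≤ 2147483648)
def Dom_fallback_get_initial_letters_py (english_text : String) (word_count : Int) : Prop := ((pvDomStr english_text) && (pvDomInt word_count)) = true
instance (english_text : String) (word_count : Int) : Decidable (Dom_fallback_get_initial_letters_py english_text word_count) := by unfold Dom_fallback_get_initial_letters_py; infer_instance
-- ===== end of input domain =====

-- B replaces A's enumerated loop (index compared against word_count each step) by a
-- structural recursion over the word list carrying a decrementing hint budget (-1 = unlimited).

-- ===== PORT A =====
def fallback_get_initial_letters_py (english_text : String) (word_count : Int) : String :=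
  let words := PySem.Str.split₀ english_text
  let result := (PySem.List.enumerate words 0).foldl
    (fun acc p =>
      let i := p.1
      let word := p.2
      if word_count == 0 || decide (i < word_count) then
        match word.toList with
        | c :: _ =>
            if PySem.Chars.isalpha c then
              acc ++ [String.ofList (c :: List.replicate (word.toList.length - 1) '_')]
            else acc ++ [word]
        | [] => acc ++ [word]
      else acc ++ [String.ofList (List.replicate word.toList.length '_')]) []
  PySem.Str.join " " result

-- ===== PORT B =====
-- Source B's inner 'go': recursion over the word list with a decrementing budget
def pvGo : List String → Int → List String
  | [], _ => []
  | w :: ws, budget =>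
      (if budget ≠ 0 then
        match w.toList with
        | c :: rest =>
            if PySem.Chars.isalpha c then String.ofList (c :: List.replicate rest.length '_') else w
        | [] => w
      else String.ofList (List.replicate w.toList.length '_'))
      :: pvGo ws (if budget > 0 then budget - 1 else budget)

def fallback_get_initial_letters_py_alt (english_text : String) (word_count : Int) : String :=
  let budget : Int := if word_count == 0 then -1 else max word_count 0
  PySem.Str.join " " (pvGo (PySem.Str.split₀ english_text) budget)

-- ===== PRECONDITION & SPEC =====
def Spec_fallback_get_initial_letters_py (english_text : String) (word_count : Int) (out : String) : Prop := out = fallback_get_initial_letters_py_alt english_text word_count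
instance (english_text : String) (word_count : Int) (out : String) : Decidable (Spec_fallback_get_initial_letters_py english_text word_count out) := by unfold Spec_fallback_get_initial_letters_py; infer_instance

-- ===== CLAIM (what is proved, stated in full; the proofs are below) =====
def Claim_equal_fallback_get_initial_letters_py : Prop := ∀ (english_text : String) (word_count : Int), Dom_fallback_get_initial_letters_py english_text word_count → Spec_fallback_get_initial_letters_py english_text word_count (fallback_get_initial_letters_py english_text word_count)

-- ===== LEMMAS AND PROOFS =====

-- the per-word transforms, named for the proof
def pvMaskKeep (w : String) : String :=
  match w.toList with
  | c :: rest => if PySem.Chars.isalpha c then String.ofList (c :: List.replicate rest.length '_') else w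
  | [] => w

def pvMaskAll (w : String) : String := String.ofList (List.replicate w.toList.length '_')

-- the append-accumulator fold is a map
lemma pvFoldMap {α β : Type} (f : α → β) (xs : List α) (acc : List β) :
    xs.foldl (fun a x => a ++ [f x]) acc = acc ++ xs.map f := by
  induction xs generalizing acc with
  | nil => simp
  | cons x xs ih => simp [List.foldl, ih]

-- B's budget recursion computes A's indexed selection: budget at index s is
-- -1 when wc = 0, else max (wc - s) 0, and 'budget ≠ 0' matches 'wc == 0 || s < wc'
lemma pvGoEnum (wc : Int) (xs : List String) (s : Int) :
    pvGo xs (if wc == 0 then -1 else max (wc - s) 0)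
      = (PySem.List.enumerate xs s).map
          (fun p => if wc == 0 || decide (p.1 < wc) then pvMaskKeep p.2 else pvMaskAll p.2) := by
  induction xs generalizing s with
  | nil => simp [pvGo]
  | cons x xs ih =>
    rw [PySem.List.enumerate_cons, List.map_cons]
    by_cases h0 : wc = 0
    · subst h0
      simp only [beq_self_eq_true, if_true, Bool.true_or, pvGo]
      refine congrArg₂ _ ?_ ?_
      · simp [pvMaskKeep]
      · have := ih (s + 1)
        simpa using this
    · have hb : (wc == 0) = false := by simpa using h0
      simp only [hb, Bool.false_eq_true, if_false, Bool.false_or, pvGo]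
      refine congrArg₂ _ ?_ ?_
      · by_cases hs : s < wc
        · rw [if_pos (by omega), if_pos (by simpa using hs)]
          simp [pvMaskKeep]
        · rw [if_neg (by omega), if_neg (by simpa using hs)]
          simp [pvMaskAll]
      · have harg : (if (max (wc - s) 0) > 0 then (max (wc - s) 0) - 1 else (max (wc - s) 0))
            = max (wc - (s + 1)) 0 := by omega
        rw [harg]
        have := ih (s + 1)
        simp only [hb, Bool.false_eq_true, if_false, Bool.false_or] at this
        exact this

-- ===== VERDICT (by name: the statement is the Claim_ definition above) =====
theorem fallback_get_initial_letters_py_spec : Claim_equal_fallback_get_initial_letters_py := by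
  intro t wc _
  unfold Spec_fallback_get_initial_letters_py fallback_get_initial_letters_py
    fallback_get_initial_letters_py_alt
  set words := PySem.Str.split₀ t with hw
  have hfun : (fun (acc : List String) (p : Int × String) =>
      if wc == 0 || decide (p.1 < wc) then
        match p.2.toList with
        | c :: _ =>
            if PySem.Chars.isalpha c then
              acc ++ [String.ofList (c :: List.replicate (p.2.toList.length - 1) '_')]
            else acc ++ [p.2]
        | [] => acc ++ [p.2]
      else acc ++ [String.ofList (List.replicate p.2.toList.length '_')])
      = fun acc p => acc ++
          [if wc == 0 || decide (p.1 < wc) then pvMaskKeep p.2 else pvMaskAll p.2] := by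
    funext acc p
    unfold pvMaskKeep pvMaskAll
    rcases h : p.2.toList with _ | ⟨c, rest⟩ <;> simp only [h] <;> split_ifs <;> simp
  rw [hfun]
  dsimp only
  rw [pvFoldMap]
  congr 1
  have := pvGoEnum wc words 0
  rw [show wc - 0 = wc from by ring] at this
  simp only [List.nil_append]
  exact this.symm
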